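-- pv_equiv track=rewrite | github.com/omrir7/CRELAT | src/CoOccurances.py | generate_idx_dict
-- ===== SOURCE A (Python) =====
-- def generate_idx_dict(text, found_names_full):
--     '''
--     create an idx_dct where the keys are the idx of the names in
--     the text and the values are the names
--     '''
--     res = dict()
--     for i, word in enumerate(text):
--         for k, v in found_names_full.items():
--             if word not in v:
--                 continue
--             res[i] = k
--     return res
-- ===== SOURCE B (Python) =====
-- def generate_idx_dict(text, found_names_full):
--     # Build a name -> group-key index once (later groups overwrite earlier,
--     # reproducing last-wins), then a single pass over the text.
--     name2key = {}
--     for k, v in found_names_full.items():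
--         for name in v:
--             name2key[name] = k
--     res = {}
--     for i, word in enumerate(text):
--         if word in name2key:
--             res[i] = name2key[word]
--     return res
-- ===== Notes on version B (the rewrite author's own statement) =====
-- stated objective: faster
-- what changed: Builds a name-to-group-key dictionary once (later groups overwrite, keeping last-wins), then a single pass over the text with one lookup per word, instead of scanning every group's name list for every word.
import Mathlib
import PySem

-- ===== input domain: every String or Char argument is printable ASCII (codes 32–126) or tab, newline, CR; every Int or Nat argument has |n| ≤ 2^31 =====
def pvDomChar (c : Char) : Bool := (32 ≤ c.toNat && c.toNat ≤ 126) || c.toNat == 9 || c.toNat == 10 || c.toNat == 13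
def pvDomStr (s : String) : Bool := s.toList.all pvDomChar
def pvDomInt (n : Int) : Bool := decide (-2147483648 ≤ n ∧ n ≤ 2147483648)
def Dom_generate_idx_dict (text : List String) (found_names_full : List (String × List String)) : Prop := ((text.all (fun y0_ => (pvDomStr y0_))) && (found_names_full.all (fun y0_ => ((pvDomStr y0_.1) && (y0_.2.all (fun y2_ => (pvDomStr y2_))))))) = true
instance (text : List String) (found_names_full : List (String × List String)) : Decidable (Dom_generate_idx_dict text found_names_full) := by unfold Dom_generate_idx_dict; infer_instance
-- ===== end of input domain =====

-- B replaces A's per-word scan over every group's name list by a name→key dictionary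
-- built once plus a single lookup per word (same result, faster on large inputs).


-- ===== PORT A =====
def generate_idx_dict (text : List String) (found_names_full : List (String × List String)) : List (Int × String) :=
  ((PySem.List.enumerate text).foldl
    (fun res p =>
      found_names_full.foldl
        (fun res kv => if p.2 ∈ kv.2 then res.insert p.1 kv.1 else res)
        res)
    (PySem.Dict.empty : PySem.Dict Int String)).items

-- ===== PORT B =====
-- B's name→key index, built once by iterating the groups (later groups overwrite)
def pvName2Key (found_names_full : List (String × List String)) : PySem.Dict String String :=
  found_names_full.foldl
    (fun d kv => kv.2.foldl (fun d name => d.insert name kv.1) d)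
    PySem.Dict.empty

def generate_idx_dict_alt (text : List String) (found_names_full : List (String × List String)) : List (Int × String) :=
  let name2key := pvName2Key found_names_full
  ((PySem.List.enumerate text).foldl
    (fun res p =>
      match name2key.get? p.2 with
      | some k => res.insert p.1 k
      | none => res)
    (PySem.Dict.empty : PySem.Dict Int String)).items

-- ===== PRECONDITION & SPEC =====
def Spec_generate_idx_dict (text : List String) (found_names_full : List (String × List String)) (out : List (Int × String)) : Prop := out = generate_idx_dict_alt text found_names_full
instance (text : List String) (found_names_full : List (String × List String)) (out : List (Int × String)) : Decidable (Spec_generate_idx_dict text found_names_full out) := by unfold Spec_generate_idx_dict; infer_instance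

-- ===== CLAIM (what is proved, stated in full; the proofs are below) =====
def Claim_equal_generate_idx_dict : Prop := ∀ (text : List String) (found_names_full : List (String × List String)), Dom_generate_idx_dict text found_names_full → Spec_generate_idx_dict text found_names_full (generate_idx_dict text found_names_full)

-- ===== LEMMAS AND PROOFS =====

-- the key of the LAST group whose name list contains `word` (none if no group matches)
def lastMatch (word : String) : List (String × List String) → Option String
  | [] => none
  | kv :: rest => match lastMatch word rest with
      | some k => some k
      | none => if word ∈ kv.2 then some kv.1 else none

-- A's inner loop over the groups equals one overwrite by the last matching key
theorem foldl_groups_eq_lastMatch (word : String) (i : Int)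
    (fnf : List (String × List String)) (res : PySem.Dict Int String) :
    fnf.foldl (fun res kv => if word ∈ kv.2 then res.insert i kv.1 else res) res =
      match lastMatch word fnf with
      | some k => res.insert i k
      | none => res := by
  induction fnf generalizing res with
  | nil => simp [lastMatch]
  | cons kv rest ih =>
    simp only [List.foldl_cons, ih, lastMatch]
    cases h : lastMatch word rest with
    | some k =>
      split_ifs with hmem
      · simp [PySem.Dict.insert_insert_self]
      · rfl
    | none => split_ifs <;> rfl

-- lookup after B's inner name-insertion loop
theorem get?_foldl_names (names : List String) (k w : String) (d : PySem.Dict String String) :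
    (names.foldl (fun d n => d.insert n k) d).get? w =
      if w ∈ names then some k else d.get? w := by
  induction names generalizing d with
  | nil => simp
  | cons n ns ih =>
    simp only [List.foldl_cons, ih, List.mem_cons]
    by_cases hns : w ∈ ns
    · simp [hns]
    · by_cases hn : w = n
      · simp [hn, PySem.Dict.get?_insert_self]
      · simp [hns, hn, PySem.Dict.get?_insert_of_ne _ _ hn]

-- lookup in B's name→key dictionary is exactly the last matching group key
theorem get?_name2key (fnf : List (String × List String)) (w : String)
    (d : PySem.Dict String String) :
    (fnf.foldl (fun d kv => kv.2.foldl (fun d name => d.insert name kv.1) d) d).get? w =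
      match lastMatch w fnf with
      | some k => some k
      | none => d.get? w := by
  induction fnf generalizing d with
  | nil => simp [lastMatch]
  | cons kv rest ih =>
    simp only [List.foldl_cons, ih, lastMatch]
    cases lastMatch w rest with
    | some k => rfl
    | none => rw [get?_foldl_names]; split_ifs <;> rfl

-- ===== VERDICT (by name: the statement is the Claim_ definition above) =====
theorem generate_idx_dict_spec : Claim_equal_generate_idx_dict := by
  intro text fnf _
  unfold Spec_generate_idx_dict generate_idx_dict generate_idx_dict_alt
  congr 1
  generalize (PySem.Dict.empty : PySem.Dict Int String) = res
  induction PySem.List.enumerate text generalizing res with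
  | nil => rfl
  | cons p l ih =>
    rw [List.foldl_cons, List.foldl_cons, ih]
    congr 1
    rw [foldl_groups_eq_lastMatch]
    unfold pvName2Key
    rw [get?_name2key]
    cases lastMatch p.2 fnf <;> simp
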